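-- pv_equiv track=rewrite | github.com/rte-france/Grid2Op | grid2op/tests/BaseBackendTest.py | aux_nth_combination
-- ===== SOURCE A (Python) =====
-- def aux_nth_combination(iterable, r, index):
--     "Equivalent to list(combinations(iterable, r))[index]"
--     pool = tuple(iterable)
--     n = len(pool)
--     if r < 0 or r > n:
--         raise ValueError
--     c = 1
--     k = min(r, n - r)
--     for i in range(1, k + 1):
--         c = c * (n - k + i) // i
--     if index < 0:
--         index += c
--     if index < 0 or index >= c:
--         raise IndexError
--     result = []
--     while r:
--         c, n, r = c * r // n, n - 1, r - 1
--         while index >= c: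
--             index -= c
--             c, n = c * (n - r) // n, n - 1
--         result.append(pool[-1 - n])
--     return tuple(result)
-- ===== SOURCE B (Python) =====
-- def _combs(pool, r):
--     if r == 0:
--         return [()]
--     if not pool:
--         return []
--     head, rest = pool[0], pool[1:]
--     return [(head,) + t for t in _combs(rest, r - 1)] + _combs(rest, r)
--
-- def aux_nth_combination(iterable, r, index):
--     "Equivalent to list(combinations(iterable, r))[index]"
--     pool = tuple(iterable)
--     if r < 0 or r > len(pool):
--         raise ValueError
--     return _combs(pool, r)[index]
-- ===== Notes on version B (the rewrite author's own statement) =====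
-- stated objective: simpler
-- what changed: A unranks the nth combination directly with combinatorial counting (binomial coefficients and skip arithmetic); B simply enumerates all r-combinations by structural recursion and indexes the list, which is the straightforward reading of A's own docstring.
import Mathlib
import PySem

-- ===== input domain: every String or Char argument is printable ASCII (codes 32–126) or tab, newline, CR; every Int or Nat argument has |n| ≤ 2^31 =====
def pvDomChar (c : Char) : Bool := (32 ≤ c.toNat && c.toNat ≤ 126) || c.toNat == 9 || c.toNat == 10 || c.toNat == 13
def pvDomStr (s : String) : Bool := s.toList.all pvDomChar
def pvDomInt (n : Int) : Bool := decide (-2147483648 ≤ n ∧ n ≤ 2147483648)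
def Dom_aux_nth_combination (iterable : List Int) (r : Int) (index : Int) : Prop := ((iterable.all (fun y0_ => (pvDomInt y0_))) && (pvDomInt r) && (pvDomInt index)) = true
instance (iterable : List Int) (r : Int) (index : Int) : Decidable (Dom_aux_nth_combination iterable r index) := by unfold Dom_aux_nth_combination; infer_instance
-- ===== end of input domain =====

-- B replaces A's combinatorial-number-system unranking by plainly enumerating all combinations and
-- indexing into the list (objective: simpler; B is the slower of the two). Return values agree on Pre_.

-- ===== PORT A =====
-- the `for i in range(1, k+1): c = c * (n - k + i) // i` loop
def auxInitC (n k : Int) : Int :=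
  (PySem.List.pyRange 1 (k + 1) 1).foldl (fun c i => PySem.Int.floordiv (c * (n - k + i)) i) 1

-- the inner `while index >= c:` loop; the fuel only makes the recursion total (never exhausted inside Pre_)
def auxInner (index c n r : Int) : Nat → Int × Int × Int
  | 0 => (index, c, n)
  | fuel + 1 =>
    if index ≥ c then
      auxInner (index - c) (PySem.Int.floordiv (c * (n - r)) n) (n - 1) r fuel
    else (index, c, n)

-- the outer `while r:` loop; fuel r.toNat is exact (r decreases by 1 each pass)
def auxOuter (pool : List Int) : Int → Int → Int → Int → List Int → Nat → List Int
  | _, _, _, _, result, 0 => result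
  | index, c, n, r, result, fuel + 1 =>
    if r ≠ 0 then
      let s := auxInner index (PySem.Int.floordiv (c * r) n) (n - 1) (r - 1) ((n - 1).toNat + 1)
      -- `result.append(pool[-1 - n])`; the getD default never fires inside Pre_
      auxOuter pool s.1 s.2.1 s.2.2 (r - 1)
        (result ++ [(PySem.List.pyGet? pool (-1 - s.2.2)).getD 0]) fuel
    else result

def aux_nth_combination (iterable : List Int) (r : Int) (index : Int) : List Int :=
  let n : Int := iterable.length
  if r < 0 ∨ r > n then []          -- `raise ValueError`: excluded by Pre_
  else
    let c := auxInitC n (min r (n - r))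
    let index1 := if index < 0 then index + c else index
    if index1 < 0 ∨ index1 ≥ c then []   -- `raise IndexError`: excluded by Pre_
    else auxOuter iterable index1 c n r [] r.toNat

-- ===== PORT B =====
-- Source B's _combs: all r-combinations of pool in itertools order, by structural recursion on pool
def combsAlt (pool : List Int) (r : Int) : List (List Int) :=
  if r = 0 then [[]]
  else
    match pool with
    | [] => []
    | h :: rest => (combsAlt rest (r - 1)).map (fun t => h :: t) ++ combsAlt rest r
termination_by pool.length

def aux_nth_combination_alt (iterable : List Int) (r : Int) (index : Int) : List Int :=
  if r < 0 ∨ r > (iterable.length : Int) then []   -- `raise ValueError`: excluded by Pre_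
  else (PySem.List.pyGet? (combsAlt iterable r) index).getD []   -- IndexError: excluded by Pre_

-- ===== PRECONDITION & SPEC =====
-- Pre_ excludes exactly the inputs where A raises: ValueError when r < 0 or r > len(iterable),
-- IndexError when index is outside [-C(n,r), C(n,r)).
def Pre_aux_nth_combination (iterable : List Int) (r : Int) (index : Int) : Prop :=
  0 ≤ r ∧ r ≤ (iterable.length : Int) ∧
  -((Nat.choose iterable.length r.toNat : Nat) : Int) ≤ index ∧
  index < ((Nat.choose iterable.length r.toNat : Nat) : Int)
instance (iterable : List Int) (r : Int) (index : Int) : Decidable (Pre_aux_nth_combination iterable r index) := by unfold Pre_aux_nth_combination; infer_instance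

def pvWitness_aux_nth_combination : List Int × Int × Int := ([1, 2, 3, 4], 2, 3)

def Spec_aux_nth_combination (iterable : List Int) (r : Int) (index : Int) (out : List Int) : Prop := out = aux_nth_combination_alt iterable r index
instance (iterable : List Int) (r : Int) (index : Int) (out : List Int) : Decidable (Spec_aux_nth_combination iterable r index out) := by unfold Spec_aux_nth_combination; infer_instance

-- ===== CLAIM (what is proved, stated in full; the proofs are below) =====
def Claim_equal_aux_nth_combination : Prop := ∀ (iterable : List Int) (r : Int) (index : Int), Dom_aux_nth_combination iterable r index → Pre_aux_nth_combination iterable r index → Spec_aux_nth_combination iterable r index (aux_nth_combination iterable r index)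

-- ===== LEMMAS AND PROOFS =====

-- the common unranking function both ports are reduced to
def unrank : List Int → Nat → Nat → List Int
  | _, 0, _ => []
  | [], _ + 1, _ => []
  | h :: t, rr + 1, i =>
    if i < Nat.choose t.length rr then h :: unrank t rr i
    else unrank t (rr + 1) (i - Nat.choose t.length rr)

-- the value of A's inner skip loop: (final index, final n), by recursion on n
def innerSpec : Nat → Nat → Nat → Nat × Nat
  | 0, _, i => (i, 0)
  | m + 1, k, i =>
    if i < Nat.choose (m + 1) k then (i, m + 1)
    else innerSpec m k (i - Nat.choose (m + 1) k)

-- exact division through floordiv on casts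
lemma floordiv_cast_mul (a b : Nat) (hb : 0 < b) :
    PySem.Int.floordiv ((a * b : Nat) : Int) ((b : Nat) : Int) = (a : Int) := by
  rw [PySem.Int.floordiv_natCast, Nat.mul_div_cancel a hb]

-- length of B's enumeration is the binomial coefficient
lemma combsAlt_length (pool : List Int) (rN : Nat) :
    (combsAlt pool (rN : Int)).length = Nat.choose pool.length rN := by
  induction pool generalizing rN with
  | nil =>
    cases rN with
    | zero => simp [combsAlt]
    | succ k => rw [combsAlt]; simp [Nat.choose_eq_zero_of_lt]; omega
  | cons h t ih =>
    cases rN with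
    | zero => simp [combsAlt]
    | succ k =>
      rw [combsAlt]
      have h0 : ((k + 1 : Nat) : Int) ≠ 0 := by omega
      have e1 : ((k + 1 : Nat) : Int) - 1 = (k : Int) := by push_cast; ring
      simp only [h0, if_false, e1]
      have i1 := ih k
      have i2 := ih (k + 1)
      push_cast at i2
      simp [i1, i2, Nat.choose_succ_succ]

-- B's enumeration indexed at iN is unrank
lemma combsAlt_getElem? (pool : List Int) (rN iN : Nat) (h : iN < Nat.choose pool.length rN) :
    (combsAlt pool (rN : Int))[iN]? = some (unrank pool rN iN) := by
  induction pool generalizing rN iN with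
  | nil =>
    cases rN with
    | zero =>
      simp at h; subst h
      simp [combsAlt, unrank]
    | succ k => simp [Nat.choose_eq_zero_of_lt] at h
  | cons x t ih =>
    cases rN with
    | zero =>
      simp at h; subst h
      simp [combsAlt, unrank]
    | succ k =>
      rw [combsAlt]
      have h0 : ((k + 1 : Nat) : Int) ≠ 0 := by omega
      have e1 : ((k + 1 : Nat) : Int) - 1 = (k : Int) := by push_cast; ring
      simp only [h0, if_false, e1]
      rw [unrank]
      by_cases hc : iN < Nat.choose t.length k
      · rw [if_pos hc]
        rw [List.getElem?_append_left (by simp [combsAlt_length]; omega)]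
        simp [ih k iN hc]
      · rw [if_neg hc]
        rw [List.getElem?_append_right (by simp [combsAlt_length]; omega)]
        have hlen : ((combsAlt t (k : Int)).map (fun s => x :: s)).length = Nat.choose t.length k := by
          simp [combsAlt_length]
        rw [hlen]
        have h2 : iN - Nat.choose t.length k < Nat.choose t.length (k + 1) := by
          simp [Nat.choose_succ_succ] at h; omega
        have := ih (k + 1) (iN - Nat.choose t.length k) h2
        push_cast at this
        exact this

-- A's initial product loop: invariant c = C(n-k+j, j) after j passes
lemma initC_loop (n k : Nat) (hk : k ≤ n) : ∀ j, j ≤ k →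
    (PySem.List.pyRange 1 ((j : Int) + 1) 1).foldl
      (fun c i => PySem.Int.floordiv (c * ((n : Int) - (k : Int) + i)) i) 1
      = ((Nat.choose (n - k + j) j : Nat) : Int) := by
  intro j
  induction j with
  | zero => intro _; rw [PySem.List.pyRange_one_eq_nil (by norm_num)]; simp
  | succ j ihj =>
    intro hj
    push_cast
    rw [show (j : Int) + 1 + 1 = ((j : Int) + 1) + 1 by ring,
        PySem.List.pyRange_one_succ_right (by omega)]
    rw [List.foldl_append]
    rw [ihj (by omega)]
    simp only [List.foldl_cons, List.foldl_nil]
    have e2 : (n : Int) - (k : Int) + ((j : Int) + 1) = ((n - k + j + 1 : Nat) : Int) := by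
      omega
    rw [e2]
    have e3 : ((Nat.choose (n - k + j) j : Nat) : Int) * ((n - k + j + 1 : Nat) : Int)
        = ((Nat.choose (n - k + j + 1) (j + 1) * (j + 1) : Nat) : Int) := by
      push_cast [← Nat.add_one_mul_choose_eq]
      ring
    rw [e3, show ((j : Int) + 1) = ((j + 1 : Nat) : Int) by push_cast; ring,
        floordiv_cast_mul _ _ (by omega)]
    norm_cast

-- A's initial product loop computes C(n, k)
lemma auxInitC_eq (n k : Nat) (hk : k ≤ n) :
    auxInitC (n : Int) (k : Int) = ((Nat.choose n k : Nat) : Int) := by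
  have := initC_loop n k hk k le_rfl
  unfold auxInitC
  rw [this, Nat.sub_add_cancel hk]

-- C(m+1, k) * (m+1-k) = C(m, k) * (m+1): the exact division behind A's inner skip step
lemma choose_skip_identity (m' k : Nat) :
    Nat.choose (m' + 1) k * (m' + 1 - k) = Nat.choose m' k * (m' + 1) := by
  rw [← Nat.choose_succ_right_eq, ← Nat.add_one_mul_choose_eq]
  exact Nat.mul_comm _ _

-- A's inner loop computes innerSpec (and its result satisfies the loop invariant)
lemma auxInner_eq (m : Nat) : ∀ (k i fuel : Nat), m < fuel → i < Nat.choose (m + 1) (k + 1) →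
    auxInner (i : Int) ((Nat.choose m k : Nat) : Int) (m : Int) (k : Int) fuel
      = (((innerSpec m k i).1 : Int), ((Nat.choose (innerSpec m k i).2 k : Nat) : Int), ((innerSpec m k i).2 : Int))
    ∧ (innerSpec m k i).1 < Nat.choose (innerSpec m k i).2 k ∧ k ≤ (innerSpec m k i).2 := by
  induction m with
  | zero =>
    intro k i fuel hf hi
    match fuel, hf with
    | f + 1, _ =>
    cases k with
    | zero =>
      have : i = 0 := by simpa using hi
      subst this
      simp [auxInner, innerSpec]
    | succ k' =>
      exfalso
      rw [Nat.choose_eq_zero_of_lt (by omega)] at hi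
      omega
  | succ m' ihm =>
    intro k i fuel hf hi
    match fuel, hf with
    | f + 1, _ =>
    rw [auxInner]
    by_cases hc : i < Nat.choose (m' + 1) k
    · rw [if_neg (by omega)]
      rw [innerSpec, if_pos hc]
      have hk : k ≤ m' + 1 := by
        by_contra hgt
        rw [Nat.choose_eq_zero_of_lt (by omega)] at hc
        omega
      exact ⟨rfl, hc, hk⟩
    · rw [if_pos (by omega)]
      rw [innerSpec, if_neg hc]
      set i' := i - Nat.choose (m' + 1) k with hi'
      have hsplit : Nat.choose (m' + 1 + 1) (k + 1)
          = Nat.choose (m' + 1) k + Nat.choose (m' + 1) (k + 1) := Nat.choose_succ_succ _ _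
      have hi2 : i' < Nat.choose (m' + 1) (k + 1) := by omega
      have hkm : k ≤ m' := by
        by_contra hgt
        rw [Nat.choose_eq_zero_of_lt (by omega)] at hi2
        omega
      have ecast1 : (i : Int) - ((Nat.choose (m' + 1) k : Nat) : Int) = (i' : Int) := by
        omega
      have ecast2 : ((m' + 1 : Nat) : Int) - 1 = (m' : Int) := by push_cast; ring
      have ediv : PySem.Int.floordiv (((Nat.choose (m' + 1) k : Nat) : Int) * (((m' + 1 : Nat) : Nat) - (k : Int))) ((m' + 1 : Nat) : Int)
          = ((Nat.choose m' k : Nat) : Int) := by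
        have esub : ((m' + 1 : Nat) : Int) - (k : Int) = ((m' + 1 - k : Nat) : Int) := by omega
        rw [esub, ← Nat.cast_mul, choose_skip_identity m' k]
        exact floordiv_cast_mul _ _ (by omega)
      rw [ecast1, ecast2, ediv]
      exact ihm k i' f (by omega) hi2

-- unrank unfolds along innerSpec: the skip loop locates the suffix whose head is emitted
lemma unrank_innerSpec (u : List Int) : ∀ (x : Int) (k i : Nat), i < Nat.choose (u.length + 1) (k + 1) →
    ∃ pre2 y t, x :: u = pre2 ++ y :: t ∧
      t.length = (innerSpec u.length k i).2 ∧
      unrank (x :: u) (k + 1) i = y :: unrank t k (innerSpec u.length k i).1 := by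
  induction u with
  | nil =>
    intro x k i hi
    cases k with
    | zero =>
      have : i = 0 := by simpa using hi
      subst this
      exact ⟨[], x, [], rfl, rfl, by simp [unrank]⟩
    | succ k' =>
      exfalso
      simp only [List.length_nil] at hi
      rw [Nat.choose_eq_zero_of_lt (by omega)] at hi
      omega
  | cons h u' ih =>
    intro x k i hi
    by_cases hc : i < Nat.choose (u'.length + 1) k
    · refine ⟨[], x, h :: u', rfl, ?_, ?_⟩
      · simp [innerSpec, List.length_cons, hc]
      · rw [unrank]
        simp [List.length_cons, hc, innerSpec]
    · have hsplit : Nat.choose (u'.length + 1 + 1) (k + 1)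
          = Nat.choose (u'.length + 1) k + Nat.choose (u'.length + 1) (k + 1) :=
        Nat.choose_succ_succ _ _
      have hi2 : i - Nat.choose (u'.length + 1) k < Nat.choose (u'.length + 1) (k + 1) := by
        simp only [List.length_cons] at hi
        omega
      obtain ⟨pre2, y, t, hdec, hlen, hunr⟩ := ih h k (i - Nat.choose (u'.length + 1) k) hi2
      refine ⟨x :: pre2, y, t, by rw [List.cons_append, ← hdec], ?_, ?_⟩
      · rw [hlen]
        simp only [List.length_cons, innerSpec]
        rw [if_neg hc]
      · rw [unrank]
        simp only [List.length_cons, if_neg hc]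
        rw [hunr]
        simp only [innerSpec, if_neg hc]

-- the outer loop, started on suffix s of the pool with c = C(|s|, r), produces unrank s r i
lemma auxOuter_eq (rN : Nat) : ∀ (s pre acc : List Int) (iN : Nat), rN ≤ s.length →
    iN < Nat.choose s.length rN →
    auxOuter (pre ++ s) (iN : Int) ((Nat.choose s.length rN : Nat) : Int) ((s.length : Nat) : Int) ((rN : Nat) : Int) acc rN
      = acc ++ unrank s rN iN := by
  induction rN with
  | zero =>
    intro s pre acc iN _ _
    rw [auxOuter]
    cases s with
    | nil => simp [unrank]
    | cons a b => simp [unrank]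
  | succ k ih =>
    intro s pre acc iN hrs hi
    match s, hrs with
    | x :: u, _ =>
    rw [auxOuter]
    rw [if_pos (by push_cast; omega)]
    set m := u.length with hm
    -- the first update: c1 = C(m, k), n1 = m, r1 = k
    have ec1 : PySem.Int.floordiv (((Nat.choose (x :: u).length (k + 1) : Nat) : Int) * ((k + 1 : Nat) : Int))
        (((x :: u).length : Nat) : Int) = ((Nat.choose m k : Nat) : Int) := by
      simp only [List.length_cons, ← hm]
      rw [← Nat.cast_mul, ← Nat.add_one_mul_choose_eq, Nat.mul_comm]
      exact floordiv_cast_mul _ _ (by omega)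
    have en1 : (((x :: u).length : Nat) : Int) - 1 = (m : Int) := by simp [hm]
    have er1 : (((k + 1 : Nat) : Nat) : Int) - 1 = (k : Int) := by push_cast; ring
    have hi' : iN < Nat.choose (m + 1) (k + 1) := by
      simpa [hm] using hi
    have hinner := auxInner_eq m k iN (m + 1) (by omega) hi'
    obtain ⟨pre2, y, t, hdec, hlen, hunr⟩ := unrank_innerSpec u x k iN hi'
    set i' := (innerSpec m k iN).1
    set m' := (innerSpec m k iN).2
    simp only [ec1, en1, er1, Int.toNat_natCast]
    rw [hinner.1]
    have hi'lt : i' < Nat.choose m' k := hinner.2.1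
    have hkm' : k ≤ m' := hinner.2.2
    -- decompose the pool around the emitted element
    have hlen2 : pre2.length = m - m' := by
      have := congrArg List.length hdec
      simp [hlen] at this
      omega
    have hm'm : m' ≤ m := by
      have := congrArg List.length hdec
      simp [hlen] at this
      omega
    have hpool : pre ++ x :: u = ((pre ++ pre2) ++ [y]) ++ t := by
      rw [hdec]; simp
    -- the element pool[-1 - m'] is y
    have helem : (PySem.List.pyGet? (pre ++ x :: u) (-1 - ((m' : Nat) : Int))).getD 0 = y := by
      have ecast : -1 - ((m' : Nat) : Int) = -(((m' + 1 : Nat) : Nat) : Int) := by push_cast; ring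
      rw [ecast, hpool, PySem.List.pyGet?_neg_natCast _ (m' + 1) (by omega) (by simp; omega)]
      have elen : (((pre ++ pre2) ++ [y]) ++ t).length - (m' + 1) = (pre ++ pre2).length := by
        simp [hlen, hlen2]; omega
      rw [elen, show (pre ++ pre2) ++ [y] ++ t = (pre ++ pre2) ++ (y :: t) by simp]
      rw [List.getElem?_append_right (by omega)]
      simp
    rw [helem]
    -- apply the induction hypothesis on the suffix t
    have ihap := ih t ((pre ++ pre2) ++ [y]) (acc ++ [y]) i' (by omega) (by rw [hlen]; exact hi'lt)
    rw [hlen] at ihap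
    rw [hpool, ihap, hunr]
    simp

-- ===== VERDICT (by name: the statement is the Claim_ definition above) =====
theorem aux_nth_combination_spec : Claim_equal_aux_nth_combination := by
  intro iterable r index _ hpre
  obtain ⟨hr0, hrn, hlo, hhi⟩ := hpre
  unfold Spec_aux_nth_combination aux_nth_combination aux_nth_combination_alt
  simp only []
  obtain ⟨rN, hr⟩ : ∃ rN : Nat, r = (rN : Int) := ⟨r.toNat, by omega⟩
  subst hr
  rw [Int.toNat_natCast] at hlo hhi
  have hrn' : rN ≤ iterable.length := by omega
  rw [if_neg (by omega)]
  -- the initial count c is C(n, rN)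
  have hc : auxInitC (iterable.length : Int) (min ((rN : Nat) : Int) ((iterable.length : Int) - ((rN : Nat) : Int)))
      = ((Nat.choose iterable.length rN : Nat) : Int) := by
    by_cases hle : ((rN : Nat) : Int) ≤ (iterable.length : Int) - ((rN : Nat) : Int)
    · rw [min_eq_left hle, auxInitC_eq iterable.length rN hrn']
    · have e : min ((rN : Nat) : Int) ((iterable.length : Int) - ((rN : Nat) : Int))
          = ((iterable.length - rN : Nat) : Int) := by
        rw [min_eq_right (by omega)]; omega
      rw [e, auxInitC_eq iterable.length (iterable.length - rN) (by omega),
          Nat.choose_symm hrn']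
  rw [hc]
  -- the normalised index
  obtain ⟨iN, hiN, hiNC⟩ : ∃ iN : Nat,
      (if index < 0 then index + ((Nat.choose iterable.length rN : Nat) : Int) else index) = (iN : Int)
      ∧ iN < Nat.choose iterable.length rN := by
    refine ⟨(if index < 0 then index + ((Nat.choose iterable.length rN : Nat) : Int) else index).toNat, ?_, ?_⟩
      <;> split_ifs <;> omega
  rw [hiN, if_neg (by omega)]
  -- A's side: the outer loop over the full pool computes unrank
  have hA := auxOuter_eq rN iterable [] [] iN hrn' hiNC
  simp only [List.nil_append] at hA
  rw [Int.toNat_natCast, hA]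
  -- B's side: indexing the enumeration yields the same unrank
  have hBlen : (combsAlt iterable ((rN : Nat) : Int)).length = Nat.choose iterable.length rN :=
    combsAlt_length iterable rN
  have hBget : PySem.List.pyGet? (combsAlt iterable ((rN : Nat) : Int)) index
      = some (unrank iterable rN iN) := by
    by_cases hneg : index < 0
    · rw [if_pos hneg] at hiN
      have e : index = -(((-index).toNat : Nat) : Int) := by omega
      rw [e, PySem.List.pyGet?_neg_natCast _ _ (by omega) (by rw [hBlen]; omega)]
      rw [hBlen]
      have e2 : Nat.choose iterable.length rN - (-index).toNat = iN := by omega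
      rw [e2]
      exact combsAlt_getElem? iterable rN iN hiNC
    · rw [if_neg hneg] at hiN
      rw [hiN, PySem.List.pyGet?_natCast]
      exact combsAlt_getElem? iterable rN iN hiNC
  rw [hBget, if_neg (by omega)]
  rfl
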